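-- pv_equiv track=rewrite | github.com/EnzoJP/Algoritmos-2 | practicas/tp-ada/code/main.py | caminoEnMat
-- ===== SOURCE A (Python) =====
-- def caminoEnMat(Tabla):
--     filas = len(Tabla)
--     columnas = len(Tabla[0])
--
--     # Inicializar la tabla auxiliar dp
--     dp = [[0] * columnas for _ in range(filas)]
--
--     # Llenar la primera fila y columna de dp con sumas acumulativas
--     for j in range(columnas):
--         dp[0][j] = dp[0][j - 1] + Tabla[0][j] if j > 0 else Tabla[0][j]
--
--     for i in range(1, filas):
--         dp[i][0] = dp[i - 1][0] + Tabla[i][0]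
--
--     # Calcular las sumas acumulativas mínimas
--     for i in range(1, filas):
--         for j in range(1, columnas):
--             dp[i][j] = min(dp[i - 1][j], dp[i][j - 1]) + Tabla[i][j]
--
--     # Construir el camino óptimo
--     camino_optimo = []
--     i, j = filas - 1, columnas - 1
--
--     while i > 0 or j > 0:
--         camino_optimo.append(Tabla[i][j])
--
--         if i == 0:
--             j -= 1
--         elif j == 0:
--             i -= 1
--         else:
--             if dp[i - 1][j] < dp[i][j - 1]:
--                 i -= 1
--             else:
--                 j -= 1
--
--     camino_optimo.append(Tabla[0][0])
--     camino_optimo.reverse()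
--
--     return camino_optimo
-- ===== SOURCE B (Python) =====
-- def caminoEnMat(Tabla):
--     # Single forward DP pass that carries (cost, path) per cell: no backtracking
--     # phase, no full dp table (only the previous row is kept), no final reverse.
--     filas = len(Tabla)
--     columnas = len(Tabla[0])
--     prev = []
--     for i in range(filas):
--         cur = []
--         for j in range(columnas):
--             v = Tabla[i][j]
--             if i == 0 and j == 0:
--                 cur.append((v, [v]))
--             elif i == 0:
--                 c, p = cur[j - 1]
--                 cur.append((c + v, p + [v]))
--             elif j == 0:
--                 c, p = prev[0]
--                 cur.append((c + v, p + [v]))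
--             else:
--                 uc, up = prev[j]
--                 lc, lp = cur[j - 1]
--                 if uc < lc:
--                     cur.append((uc + v, up + [v]))
--                 else:
--                     cur.append((lc + v, lp + [v]))
--         prev = cur
--     return prev[columnas - 1][1]
-- ===== Notes on version B (the rewrite author's own statement) =====
-- stated objective: alternative
-- what changed: B replaces A's dp-table-plus-backtrack with a single forward DP pass whose cells carry (cost, path) pairs, keeping only the previous row; the answer is read off the last cell, so the backtracking loop, the stored dp table and the final reverse all disappear (B trades path-copying time for that).
import Mathlib
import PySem

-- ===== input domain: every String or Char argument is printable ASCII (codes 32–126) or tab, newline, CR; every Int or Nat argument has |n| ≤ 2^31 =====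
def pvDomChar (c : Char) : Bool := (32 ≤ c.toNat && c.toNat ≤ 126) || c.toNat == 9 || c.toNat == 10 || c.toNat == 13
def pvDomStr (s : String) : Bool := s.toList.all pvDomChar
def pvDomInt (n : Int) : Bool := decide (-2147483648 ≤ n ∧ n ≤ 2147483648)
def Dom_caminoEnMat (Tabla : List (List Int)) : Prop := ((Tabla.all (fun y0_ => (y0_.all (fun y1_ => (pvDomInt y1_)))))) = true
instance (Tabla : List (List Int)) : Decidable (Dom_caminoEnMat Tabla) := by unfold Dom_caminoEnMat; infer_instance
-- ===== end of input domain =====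

-- B replaces A's dp-table-then-backtrack with a single forward DP pass that carries a
-- (cost, path) pair per cell, keeping only the previous row; same result, no backtracking.

-- shared 2-D indexing helpers (Python m[i][j] on in-range indices; Pre_ keeps them in range)
def pyCell (m : List (List Int)) (i j : Nat) : Int := (m.getD i []).getD j 0
def pySet2 (m : List (List Int)) (i j : Nat) (v : Int) : List (List Int) :=
  m.set i ((m.getD i []).set j v)

-- ===== PORT A =====
-- for j in range(columnas): dp[0][j] = dp[0][j-1] + Tabla[0][j] if j > 0 else Tabla[0][j]
def fillRow0A (T : List (List Int)) : Nat → List (List Int) → List (List Int)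
  | 0, dp => dp
  | n+1, dp =>
      let dp' := fillRow0A T n dp
      pySet2 dp' 0 n (if 0 < n then pyCell dp' 0 (n-1) + pyCell T 0 n else pyCell T 0 n)

-- for i in range(1, filas): dp[i][0] = dp[i-1][0] + Tabla[i][0]   (n = iterations done, i = n+1)
def fillCol0A (T : List (List Int)) : Nat → List (List Int) → List (List Int)
  | 0, dp => dp
  | n+1, dp =>
      let dp' := fillCol0A T n dp
      pySet2 dp' (n+1) 0 (pyCell dp' n 0 + pyCell T (n+1) 0)

-- inner loop: for j in range(1, columnas) at fixed row i   (n = iterations done, j = n+1)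
def fillRowA (T : List (List Int)) (i : Nat) : Nat → List (List Int) → List (List Int)
  | 0, dp => dp
  | n+1, dp =>
      let dp' := fillRowA T i n dp
      pySet2 dp' i (n+1) (min (pyCell dp' (i-1) (n+1)) (pyCell dp' i n) + pyCell T i (n+1))

-- outer loop: for i in range(1, filas)
def fillAllA (T : List (List Int)) (cols1 : Nat) : Nat → List (List Int) → List (List Int)
  | 0, dp => dp
  | n+1, dp => fillRowA T (n+1) cols1 (fillAllA T cols1 n dp)

-- while i > 0 or j > 0: append Tabla[i][j]; move per A's branch order
-- (fuel = i + j bounds the loop: every iteration decreases i + j by exactly 1)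
def buildPathA (T dp : List (List Int)) : Nat → Nat → Nat → List Int → List Int
  | 0, _, _, acc => acc
  | f+1, i, j, acc =>
    if 0 < i ∨ 0 < j then
      let acc' := acc ++ [pyCell T i j]
      if i = 0 then buildPathA T dp f i (j-1) acc'
      else if j = 0 then buildPathA T dp f (i-1) j acc'
      else if pyCell dp (i-1) j < pyCell dp i (j-1) then buildPathA T dp f (i-1) j acc'
      else buildPathA T dp f i (j-1) acc'
    else acc

def caminoEnMat (Tabla : List (List Int)) : List Int :=
  let filas := Tabla.length
  let columnas := (Tabla.getD 0 []).length
  let dp0 := List.replicate filas (List.replicate columnas (0 : Int))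
  let dp1 := fillRow0A Tabla columnas dp0
  let dp2 := fillCol0A Tabla (filas - 1) dp1
  let dp3 := fillAllA Tabla (columnas - 1) (filas - 1) dp2
  (buildPathA Tabla dp3 ((filas - 1) + (columnas - 1)) (filas - 1) (columnas - 1) []
    ++ [pyCell Tabla 0 0]).reverse

-- ===== PORT B =====
-- B's own 2-D indexing helper (Python Tabla[i][j]; in range under Pre_)
def cellB (m : List (List Int)) (i j : Nat) : Int := (m.getD i []).getD j 0

-- inner loop of B: build row i of (cost, path) cells, appending one cell per j
def rowB (T : List (List Int)) (prev : List (Int × List Int)) (i : Nat) :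
    Nat → List (Int × List Int)
  | 0 => []
  | n+1 =>
      let cur := rowB T prev i n
      let v := cellB T i n
      if i = 0 ∧ n = 0 then cur ++ [(v, [v])]
      else if i = 0 then
        let p := cur.getD (n-1) (0, [])
        cur ++ [(p.1 + v, p.2 ++ [v])]
      else if n = 0 then
        let p := prev.getD 0 (0, [])
        cur ++ [(p.1 + v, p.2 ++ [v])]
      else
        let u := prev.getD n (0, [])
        let l := cur.getD (n-1) (0, [])
        if u.1 < l.1 then cur ++ [(u.1 + v, u.2 ++ [v])]
        else cur ++ [(l.1 + v, l.2 ++ [v])]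

-- outer loop of B: for i in range(filas), prev := row just built; returns the last row
def tabB (T : List (List Int)) (C : Nat) : Nat → List (Int × List Int)
  | 0 => []
  | n+1 => rowB T (tabB T C n) n C

def caminoEnMat_alt (Tabla : List (List Int)) : List Int :=
  let filas := Tabla.length
  let columnas := (Tabla.getD 0 []).length
  ((tabB Tabla columnas filas).getD (columnas - 1) (0, [])).2

-- ===== PRECONDITION & SPEC =====
-- Pre_ excludes exactly the inputs where the Python A raises IndexError: the empty grid,
-- an empty first row, and grids with some row shorter than the first.
def Pre_caminoEnMat (Tabla : List (List Int)) : Prop :=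
  Tabla ≠ [] ∧ 0 < (Tabla.getD 0 []).length ∧
  ∀ row ∈ Tabla, (Tabla.getD 0 []).length ≤ row.length
instance (Tabla : List (List Int)) : Decidable (Pre_caminoEnMat Tabla) := by
  unfold Pre_caminoEnMat; infer_instance

def pvWitness_caminoEnMat : List (List Int) := [[1, 2], [3, 4]]

def Spec_caminoEnMat (Tabla : List (List Int)) (out : List Int) : Prop := out = caminoEnMat_alt Tabla
instance (Tabla : List (List Int)) (out : List Int) : Decidable (Spec_caminoEnMat Tabla out) := by
  unfold Spec_caminoEnMat; infer_instance

-- ===== CLAIM (what is proved, stated in full; the proofs are below) =====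
def Claim_equal_caminoEnMat : Prop := ∀ (Tabla : List (List Int)), Dom_caminoEnMat Tabla → Pre_caminoEnMat Tabla → Spec_caminoEnMat Tabla (caminoEnMat Tabla)

-- ===== LEMMAS AND PROOFS =====

-- B's accessor is definitionally A's
theorem cellB_eq : cellB = pyCell := rfl

-- the mathematical dp table both programs compute
def dpf (T : List (List Int)) : Nat → Nat → Int
  | 0, 0 => pyCell T 0 0
  | 0, j+1 => dpf T 0 j + pyCell T 0 (j+1)
  | i+1, 0 => dpf T i 0 + pyCell T (i+1) 0
  | i+1, j+1 => min (dpf T i (j+1)) (dpf T (i+1) j) + pyCell T (i+1) (j+1)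

-- the path both programs produce ending at cell (i, j) (ties go left, A's strict '<')
def pathF (T : List (List Int)) : Nat → Nat → List Int
  | 0, 0 => [pyCell T 0 0]
  | 0, j+1 => pathF T 0 j ++ [pyCell T 0 (j+1)]
  | i+1, 0 => pathF T i 0 ++ [pyCell T (i+1) 0]
  | i+1, j+1 =>
      (if dpf T i (j+1) < dpf T (i+1) j then pathF T i (j+1) else pathF T (i+1) j)
        ++ [pyCell T (i+1) (j+1)]

-- ---- generic getD facts ----

theorem getD_set_eq {α : Type} (l : List α) (i : Nat) (v d : α) (h : i < l.length) :
    (l.set i v).getD i d = v := by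
  simp [List.getD_eq_getElem?_getD, h]

theorem getD_set_ne {α : Type} (l : List α) (i i' : Nat) (v d : α) (h : i' ≠ i) :
    (l.set i v).getD i' d = l.getD i' d := by
  simp [List.getD_eq_getElem?_getD, List.getElem?_set_ne (by omega : i ≠ i')]

theorem getD_mapRange {α : Type} (n i : Nat) (f : Nat → α) (h : i < n) (d : α) :
    ((List.range n).map f).getD i d = f i := by
  simp [List.getD_eq_getElem?_getD, List.getElem?_map, List.getElem?_range h]

-- ---- pySet2 / replicate cell facts ----

theorem cell_set2_eq (m : List (List Int)) (i j : Nat) (v : Int)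
    (hi : i < m.length) (hj : j < (m.getD i []).length) :
    pyCell (pySet2 m i j v) i j = v := by
  unfold pyCell pySet2
  rw [getD_set_eq _ _ _ _ hi, getD_set_eq _ _ _ _ hj]

theorem cell_set2_ne (m : List (List Int)) (i j : Nat) (v : Int) (i' j' : Nat)
    (h : i' ≠ i ∨ j' ≠ j) :
    pyCell (pySet2 m i j v) i' j' = pyCell m i' j' := by
  unfold pyCell pySet2
  rcases h with h | h
  · rw [getD_set_ne _ _ _ _ _ h]
  · rcases eq_or_ne i' i with rfl | hne
    · rcases Nat.lt_or_ge i' m.length with hi | hi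
      · rw [getD_set_eq _ _ _ _ hi, getD_set_ne _ _ _ _ _ h]
      · rw [List.set_eq_of_length_le hi]
    · rw [getD_set_ne _ _ _ _ _ hne]

theorem cell_replicate (R C i j : Nat) :
    pyCell (List.replicate R (List.replicate C (0 : Int))) i j = 0 := by
  unfold pyCell
  rcases Nat.lt_or_ge i R with h | h
  · rcases Nat.lt_or_ge j C with h2 | h2
    · simp [List.getD_eq_getElem?_getD, h, h2]
    · simp [List.getD_eq_getElem?_getD, h, Nat.not_lt.2 h2]
  · simp [List.getD_eq_getElem?_getD, Nat.not_lt.2 h]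

-- shape invariant of the mutable table
def Shape (dp : List (List Int)) (R C : Nat) : Prop :=
  dp.length = R ∧ ∀ k, (dp.getD k []).length = if k < R then C else 0

theorem shape_replicate (R C : Nat) :
    Shape (List.replicate R (List.replicate C (0 : Int))) R C := by
  refine ⟨by simp, fun k => ?_⟩
  rcases Nat.lt_or_ge k R with h | h
  · simp [List.getD_eq_getElem?_getD, h]
  · simp [List.getD_eq_getElem?_getD, Nat.not_lt.2 h]

theorem shape_set2 (m : List (List Int)) (R C i j : Nat) (v : Int) (h : Shape m R C) :
    Shape (pySet2 m i j v) R C := by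
  refine ⟨by simpa [pySet2] using h.1, fun k => ?_⟩
  rcases eq_or_ne k i with rfl | hne
  · rcases Nat.lt_or_ge k m.length with hi | hi
    · unfold pySet2
      rw [getD_set_eq _ _ _ _ hi, List.length_set]
      exact h.2 k
    · unfold pySet2
      rw [List.set_eq_of_length_le hi]
      exact h.2 k
  · unfold pySet2
    rw [getD_set_ne _ _ _ _ _ hne]
    exact h.2 k

theorem shape_fillRow0A (T : List (List Int)) (R C : Nat) (dp : List (List Int))
    (h : Shape dp R C) : ∀ n, Shape (fillRow0A T n dp) R C := by
  intro n
  induction n with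
  | zero => exact h
  | succ k ih => exact shape_set2 _ _ _ _ _ _ ih

theorem shape_fillCol0A (T : List (List Int)) (R C : Nat) (dp : List (List Int))
    (h : Shape dp R C) : ∀ n, Shape (fillCol0A T n dp) R C := by
  intro n
  induction n with
  | zero => exact h
  | succ k ih => exact shape_set2 _ _ _ _ _ _ ih

theorem shape_fillRowA (T : List (List Int)) (R C i : Nat) (dp : List (List Int))
    (h : Shape dp R C) : ∀ n, Shape (fillRowA T i n dp) R C := by
  intro n
  induction n with
  | zero => exact h
  | succ k ih => exact shape_set2 _ _ _ _ _ _ ih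

theorem shape_fillAllA (T : List (List Int)) (R C c1 : Nat) (dp : List (List Int))
    (h : Shape dp R C) : ∀ n, Shape (fillAllA T c1 n dp) R C := by
  intro n
  induction n with
  | zero => exact h
  | succ k ih => exact shape_fillRowA _ _ _ _ _ ih _

-- names for A's three intermediate tables
def dpA1 (T : List (List Int)) (R C : Nat) : List (List Int) :=
  fillRow0A T C (List.replicate R (List.replicate C 0))
def dpA2 (T : List (List Int)) (R C : Nat) : List (List Int) :=
  fillCol0A T (R - 1) (dpA1 T R C)
def dpA3 (T : List (List Int)) (R C : Nat) : List (List Int) :=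
  fillAllA T (C - 1) (R - 1) (dpA2 T R C)

theorem shape_dpA1 (T : List (List Int)) (R C : Nat) : Shape (dpA1 T R C) R C :=
  shape_fillRow0A _ _ _ _ (shape_replicate R C) _
theorem shape_dpA2 (T : List (List Int)) (R C : Nat) : Shape (dpA2 T R C) R C :=
  shape_fillCol0A _ _ _ _ (shape_dpA1 T R C) _

-- ---- characterising A's fills by dpf ----

theorem fillRow0A_cells (T : List (List Int)) (R C : Nat) (hR : 0 < R) :
    ∀ n, n ≤ C → ∀ i' j',
      pyCell (fillRow0A T n (List.replicate R (List.replicate C 0))) i' j'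
        = if i' = 0 ∧ j' < n then dpf T 0 j' else 0 := by
  intro n
  induction n with
  | zero =>
    intro _ i' j'
    simp only [fillRow0A]
    rw [if_neg (by omega)]
    exact cell_replicate R C i' j'
  | succ k ih =>
    intro hk i' j'
    have hsh : Shape (fillRow0A T k (List.replicate R (List.replicate C 0))) R C :=
      shape_fillRow0A _ _ _ _ (shape_replicate R C) _
    simp only [fillRow0A]
    have hval : (if 0 < k
          then pyCell (fillRow0A T k (List.replicate R (List.replicate C 0))) 0 (k - 1)
                 + pyCell T 0 k
          else pyCell T 0 k) = dpf T 0 k := by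
      rcases Nat.eq_zero_or_pos k with rfl | hk0
      · simp [dpf]
      · rw [if_pos hk0, ih (by omega) 0 (k - 1), if_pos ⟨rfl, by omega⟩]
        obtain ⟨m, rfl⟩ : ∃ m, k = m + 1 := ⟨k - 1, by omega⟩
        simp [dpf]
    by_cases hij : i' = 0 ∧ j' = k
    · obtain ⟨h1, h2⟩ := hij
      subst h1; subst h2
      rw [cell_set2_eq _ _ _ _ (by rw [hsh.1]; exact hR) (by rw [hsh.2 0, if_pos hR]; omega)]
      rw [hval, if_pos ⟨rfl, by omega⟩]
    · rw [cell_set2_ne _ _ _ _ _ _ (by tauto), ih (by omega) i' j']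
      have heq : (i' = 0 ∧ j' < k) ↔ (i' = 0 ∧ j' < k + 1) := by omega
      rw [if_congr heq rfl rfl]

theorem dpA1_cells (T : List (List Int)) (R C : Nat) (hR : 0 < R) (i' j' : Nat) :
    pyCell (dpA1 T R C) i' j' = if i' = 0 ∧ j' < C then dpf T 0 j' else 0 :=
  fillRow0A_cells T R C hR C le_rfl i' j'

theorem fillCol0A_cells (T : List (List Int)) (R C : Nat) (hR : 0 < R) (hC : 0 < C) :
    ∀ n, n ≤ R - 1 → ∀ i' j',
      pyCell (fillCol0A T n (dpA1 T R C)) i' j'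
        = if 1 ≤ i' ∧ i' ≤ n ∧ j' = 0 then dpf T i' 0 else pyCell (dpA1 T R C) i' j' := by
  intro n
  induction n with
  | zero =>
    intro _ i' j'
    simp only [fillCol0A]
    rw [if_neg (by omega)]
  | succ k ih =>
    intro hk i' j'
    have hsh : Shape (fillCol0A T k (dpA1 T R C)) R C :=
      shape_fillCol0A _ _ _ _ (shape_dpA1 T R C) _
    simp only [fillCol0A]
    have hval : pyCell (fillCol0A T k (dpA1 T R C)) k 0 = dpf T k 0 := by
      rw [ih (by omega) k 0]
      rcases Nat.eq_zero_or_pos k with rfl | hk0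
      · rw [if_neg (by omega), dpA1_cells T R C hR, if_pos ⟨rfl, hC⟩]
      · rw [if_pos ⟨hk0, le_rfl, rfl⟩]
    by_cases hij : i' = k + 1 ∧ j' = 0
    · obtain ⟨rfl, rfl⟩ := hij
      rw [cell_set2_eq _ _ _ _ (by rw [hsh.1]; omega) (by rw [hsh.2 (k+1), if_pos (by omega)]; omega)]
      rw [hval, if_pos ⟨by omega, le_rfl, rfl⟩]
      simp [dpf]
    · rw [cell_set2_ne _ _ _ _ _ _ (by tauto), ih (by omega) i' j']
      have heq : (1 ≤ i' ∧ i' ≤ k ∧ j' = 0) ↔ (1 ≤ i' ∧ i' ≤ k + 1 ∧ j' = 0) := by omega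
      rw [if_congr heq rfl rfl]

theorem dpA2_cells (T : List (List Int)) (R C : Nat) (hR : 0 < R) (hC : 0 < C) (i' j' : Nat) :
    pyCell (dpA2 T R C) i' j'
      = if 1 ≤ i' ∧ i' ≤ R - 1 ∧ j' = 0 then dpf T i' 0
        else if i' = 0 ∧ j' < C then dpf T 0 j' else 0 := by
  rw [show dpA2 T R C = fillCol0A T (R - 1) (dpA1 T R C) from rfl,
      fillCol0A_cells T R C hR hC (R - 1) le_rfl i' j']
  by_cases hP : 1 ≤ i' ∧ i' ≤ R - 1 ∧ j' = 0
  · rw [if_pos hP, if_pos hP]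
  · rw [if_neg hP, if_neg hP, dpA1_cells T R C hR]

theorem fillRowA_cells (T : List (List Int)) (R C i : Nat) (dp : List (List Int))
    (hi1 : 1 ≤ i) (hiR : i < R) (hC : 0 < C) (hsh : Shape dp R C)
    (hprev : ∀ j', j' < C → pyCell dp (i - 1) j' = dpf T (i - 1) j')
    (h0 : pyCell dp i 0 = dpf T i 0) :
    ∀ n, n ≤ C - 1 → ∀ i' j',
      pyCell (fillRowA T i n dp) i' j'
        = if i' = i ∧ 1 ≤ j' ∧ j' ≤ n then dpf T i j' else pyCell dp i' j' := by
  intro n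
  induction n with
  | zero =>
    intro _ i' j'
    simp only [fillRowA]
    rw [if_neg (by omega)]
  | succ k ih =>
    intro hk i' j'
    have hsh' : Shape (fillRowA T i k dp) R C := shape_fillRowA _ _ _ _ _ hsh _
    simp only [fillRowA]
    have hup : pyCell (fillRowA T i k dp) (i - 1) (k + 1) = dpf T (i - 1) (k + 1) := by
      rw [ih (by omega) (i - 1) (k + 1), if_neg (by omega), hprev (k + 1) (by omega)]
    have hlf : pyCell (fillRowA T i k dp) i k = dpf T i k := by
      rw [ih (by omega) i k]
      rcases Nat.eq_zero_or_pos k with rfl | hk0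
      · rw [if_neg (by omega)]; exact h0
      · rw [if_pos ⟨rfl, hk0, le_rfl⟩]
    by_cases hij : i' = i ∧ j' = k + 1
    · obtain ⟨rfl, rfl⟩ := hij
      rw [cell_set2_eq _ _ _ _ (by rw [hsh'.1]; omega) (by rw [hsh'.2 i', if_pos hiR]; omega)]
      rw [hup, hlf, if_pos ⟨rfl, by omega, le_rfl⟩]
      obtain ⟨m, rfl⟩ : ∃ m, i' = m + 1 := ⟨i' - 1, by omega⟩
      simp [dpf]
    · rw [cell_set2_ne _ _ _ _ _ _ (by tauto), ih (by omega) i' j']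
      have heq : (i' = i ∧ 1 ≤ j' ∧ j' ≤ k) ↔ (i' = i ∧ 1 ≤ j' ∧ j' ≤ k + 1) := by omega
      rw [if_congr heq rfl rfl]

theorem fillAllA_cells (T : List (List Int)) (R C : Nat) (hR : 0 < R) (hC : 0 < C) :
    ∀ n, n ≤ R - 1 → ∀ i' j',
      pyCell (fillAllA T (C - 1) n (dpA2 T R C)) i' j'
        = if 1 ≤ i' ∧ i' ≤ n ∧ 1 ≤ j' ∧ j' ≤ C - 1 then dpf T i' j'
          else pyCell (dpA2 T R C) i' j' := by
  intro n
  induction n with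
  | zero =>
    intro _ i' j'
    simp only [fillAllA]
    rw [if_neg (by omega)]
  | succ k ih =>
    intro hk i' j'
    have hsh : Shape (fillAllA T (C - 1) k (dpA2 T R C)) R C :=
      shape_fillAllA _ _ _ _ _ (shape_dpA2 T R C) _
    simp only [fillAllA]
    have hprev : ∀ j', j' < C →
        pyCell (fillAllA T (C - 1) k (dpA2 T R C)) ((k + 1) - 1) j' = dpf T ((k + 1) - 1) j' := by
      intro j2 hj2
      simp only [Nat.add_sub_cancel]
      rw [ih (by omega) k j2]
      by_cases hcase : 1 ≤ k ∧ 1 ≤ j2 ∧ j2 ≤ C - 1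
      · rw [if_pos ⟨hcase.1, le_rfl, hcase.2⟩]
      · rw [if_neg (by omega), dpA2_cells T R C hR hC]
        rcases Nat.eq_zero_or_pos k with rfl | hk0
        · rw [if_neg (by omega), if_pos ⟨rfl, hj2⟩]
        · have hj0 : j2 = 0 := by omega
          subst hj0
          rw [if_pos ⟨hk0, by omega, rfl⟩]
    have h0 : pyCell (fillAllA T (C - 1) k (dpA2 T R C)) (k + 1) 0 = dpf T (k + 1) 0 := by
      rw [ih (by omega) (k + 1) 0, if_neg (by omega), dpA2_cells T R C hR hC,
          if_pos ⟨by omega, by omega, rfl⟩]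
    rw [fillRowA_cells T R C (k + 1) _ (by omega) (by omega) hC hsh hprev h0 (C - 1) le_rfl i' j']
    by_cases hA : i' = k + 1 ∧ 1 ≤ j' ∧ j' ≤ C - 1
    · rw [if_pos hA, if_pos ⟨by omega, by omega, hA.2⟩, hA.1]
    · rw [if_neg hA, ih (by omega) i' j']
      have heq : (1 ≤ i' ∧ i' ≤ k ∧ 1 ≤ j' ∧ j' ≤ C - 1)
          ↔ (1 ≤ i' ∧ i' ≤ k + 1 ∧ 1 ≤ j' ∧ j' ≤ C - 1) := by omega
      rw [if_congr heq rfl rfl]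

theorem dpA3_cells (T : List (List Int)) (R C : Nat) (hR : 0 < R) (hC : 0 < C)
    (i j : Nat) (hi : i < R) (hj : j < C) :
    pyCell (dpA3 T R C) i j = dpf T i j := by
  rw [show dpA3 T R C = fillAllA T (C - 1) (R - 1) (dpA2 T R C) from rfl,
      fillAllA_cells T R C hR hC (R - 1) le_rfl i j]
  by_cases h : 1 ≤ i ∧ i ≤ R - 1 ∧ 1 ≤ j ∧ j ≤ C - 1
  · rw [if_pos h]
  · rw [if_neg h, dpA2_cells T R C hR hC]
    rcases Nat.eq_zero_or_pos i with rfl | hi0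
    · rw [if_neg (by omega), if_pos ⟨rfl, hj⟩]
    · have hj0 : j = 0 := by omega
      subst hj0
      rw [if_pos ⟨hi0, by omega, rfl⟩]

-- ---- A's backtrack produces pathF ----

theorem buildPathA_eq (T dp : List (List Int)) (R C : Nat)
    (hdp : ∀ i j, i < R → j < C → pyCell dp i j = dpf T i j) :
    ∀ n i j, i + j ≤ n → i < R → j < C → ∀ acc : List Int,
      (buildPathA T dp n i j acc ++ [pyCell T 0 0]).reverse = pathF T i j ++ acc.reverse := by
  intro n
  induction n with
  | zero =>
    intro i j h hi hj acc
    have hi0 : i = 0 := by omega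
    have hj0 : j = 0 := by omega
    subst hi0; subst hj0
    simp [buildPathA, pathF]
  | succ n ih =>
    intro i j h hi hj acc
    by_cases h00 : i = 0 ∧ j = 0
    · obtain ⟨rfl, rfl⟩ := h00
      simp only [buildPathA]
      rw [if_neg (by omega)]
      simp [pathF]
    · simp only [buildPathA]
      rw [if_pos (by omega)]
      rcases Nat.eq_zero_or_pos i with rfl | hi0
      · obtain ⟨k, rfl⟩ : ∃ k, j = k + 1 := ⟨j - 1, by omega⟩
        rw [if_pos rfl]
        rw [ih 0 ((k+1) - 1) (by omega) hi (by omega) (acc ++ [pyCell T 0 (k+1)])]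
        simp [pathF]
      · rcases Nat.eq_zero_or_pos j with rfl | hj0
        · obtain ⟨m, rfl⟩ : ∃ m, i = m + 1 := ⟨i - 1, by omega⟩
          rw [if_neg (by omega), if_pos rfl]
          rw [ih ((m+1) - 1) 0 (by omega) (by omega) hj (acc ++ [pyCell T (m+1) 0])]
          simp [pathF]
        · obtain ⟨m, rfl⟩ : ∃ m, i = m + 1 := ⟨i - 1, by omega⟩
          obtain ⟨k, rfl⟩ : ∃ k, j = k + 1 := ⟨j - 1, by omega⟩
          rw [if_neg (by omega), if_neg (by omega)]
          rw [hdp ((m+1) - 1) (k+1) (by omega) hj, hdp (m+1) ((k+1) - 1) hi (by omega)]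
          simp only [Nat.add_sub_cancel]
          by_cases hcmp : dpf T m (k + 1) < dpf T (m + 1) k
          · rw [if_pos hcmp]
            rw [ih m (k+1) (by omega) (by omega) hj (acc ++ [pyCell T (m+1) (k+1)])]
            simp [pathF, hcmp]
          · rw [if_neg hcmp]
            rw [ih (m+1) k (by omega) hi (by omega) (acc ++ [pyCell T (m+1) (k+1)])]
            simp [pathF, hcmp]

-- ---- B's fused pass computes (dpf, pathF) ----

theorem rowB_spec (T : List (List Int)) (prev : List (Int × List Int)) (C i : Nat) (hC : 0 < C)
    (hprev : 0 < i → ∀ j', j' < C →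
      prev.getD j' (0, []) = (dpf T (i - 1) j', pathF T (i - 1) j')) :
    ∀ n, n ≤ C →
      rowB T prev i n = (List.range n).map (fun j => (dpf T i j, pathF T i j)) := by
  intro n
  induction n with
  | zero => simp [rowB]
  | succ k ih =>
    intro hk
    simp only [rowB, cellB_eq, ih (by omega)]
    simp only [List.range_succ, List.map_append, List.map_cons, List.map_nil]
    rcases i with _ | m
    · rcases k with _ | k2
      · simp [dpf, pathF]
      · rw [if_neg (by omega), if_pos rfl]
        simp only [Nat.add_sub_cancel]
        rw [getD_mapRange (k2 + 1) k2 _ (by omega)]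
        simp [dpf, pathF]
    · rcases k with _ | k2
      · rw [if_neg (by omega), if_neg (by omega), if_pos rfl]
        rw [hprev (by omega) 0 hC]
        simp [dpf, pathF]
      · rw [if_neg (by omega), if_neg (by omega), if_neg (by omega)]
        rw [hprev (by omega) (k2 + 1) (by omega)]
        simp only [Nat.add_sub_cancel]
        rw [getD_mapRange (k2 + 1) k2 _ (by omega)]
        by_cases hcmp : dpf T m (k2 + 1) < dpf T (m + 1) k2
        · rw [if_pos hcmp]
          have hmin : min (dpf T m (k2 + 1)) (dpf T (m + 1) k2) = dpf T m (k2 + 1) :=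
            min_eq_left (le_of_lt hcmp)
          simp [dpf, pathF, hmin, hcmp]
        · rw [if_neg hcmp]
          have hmin : min (dpf T m (k2 + 1)) (dpf T (m + 1) k2) = dpf T (m + 1) k2 :=
            min_eq_right (by omega)
          simp [dpf, pathF, hmin, hcmp]

theorem tabB_spec (T : List (List Int)) (C : Nat) (hC : 0 < C) :
    ∀ n, 0 < n →
      tabB T C n = (List.range C).map (fun j => (dpf T (n - 1) j, pathF T (n - 1) j)) := by
  intro n
  induction n with
  | zero => omega
  | succ k ih =>
    intro _
    simp only [tabB, Nat.add_sub_cancel]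
    rcases Nat.eq_zero_or_pos k with rfl | hk0
    · exact rowB_spec T _ C 0 hC (by omega) C le_rfl
    · rw [ih hk0]
      refine rowB_spec T _ C k hC ?_ C le_rfl
      intro hk1 j' hj'
      rw [getD_mapRange C j' _ hj']

-- ===== VERDICT (by name: the statement is the Claim_ definition above) =====
theorem caminoEnMat_spec : Claim_equal_caminoEnMat := by
  intro T _ hPre
  obtain ⟨hne, hC, _⟩ := hPre
  have hR : 0 < T.length := List.length_pos_of_ne_nil hne
  unfold Spec_caminoEnMat
  show (buildPathA T (dpA3 T T.length (T.getD 0 []).length)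
          ((T.length - 1) + ((T.getD 0 []).length - 1))
          (T.length - 1) ((T.getD 0 []).length - 1) [] ++ [pyCell T 0 0]).reverse
      = ((tabB T (T.getD 0 []).length T.length).getD ((T.getD 0 []).length - 1) (0, [])).2
  rw [buildPathA_eq T (dpA3 T T.length (T.getD 0 []).length) T.length (T.getD 0 []).length
        (fun i j hi hj => dpA3_cells T _ _ hR hC i j hi hj)
        ((T.length - 1) + ((T.getD 0 []).length - 1))
        (T.length - 1) ((T.getD 0 []).length - 1) le_rfl (by omega) (by omega) []]
  rw [tabB_spec T (T.getD 0 []).length hC T.length hR,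
      getD_mapRange (T.getD 0 []).length ((T.getD 0 []).length - 1) _ (by omega)]
  simp
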